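-- pv_equiv track=rewrite | github.com/songchenwen/auto_sub_downloader_py | ffmpeg_utils.py | select_source_audio_streams
-- ===== SOURCE A (Python) =====
-- def select_source_audio_streams(audio_streams):
--     languages = []
--     none_language = False
--     streams = []
--     for s in audio_streams:
--         tags = s.get('tags', {})
--         language = tags.get('language', None)
--         if language is None:
--             if not none_language:
--                 streams.append(s)
--                 none_language = True
--         else:
--             language = str(language)
--             if language not in languages:
--                 languages.append(language)
--                 streams.append(s)
--     return streams
-- ===== SOURCE B (Python) =====
-- def select_source_audio_streams(audio_streams):
--     def key(s):
--         language = s.get('tags', {}).get('language', None)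
--         return language if language is None else str(language)
--     return [s for i, s in enumerate(audio_streams)
--             if key(s) not in [key(t) for t in audio_streams[:i]]]
-- ===== Notes on version B (the rewrite author's own statement) =====
-- stated objective: alternative
-- what changed: Replaces A's stateful single pass with three mutable accumulators (languages list, none_language flag, streams list) by a stateless comprehension that keeps a stream iff its language key does not occur among the keys of the streams before it (a prefix scan per element).
import Mathlib
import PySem

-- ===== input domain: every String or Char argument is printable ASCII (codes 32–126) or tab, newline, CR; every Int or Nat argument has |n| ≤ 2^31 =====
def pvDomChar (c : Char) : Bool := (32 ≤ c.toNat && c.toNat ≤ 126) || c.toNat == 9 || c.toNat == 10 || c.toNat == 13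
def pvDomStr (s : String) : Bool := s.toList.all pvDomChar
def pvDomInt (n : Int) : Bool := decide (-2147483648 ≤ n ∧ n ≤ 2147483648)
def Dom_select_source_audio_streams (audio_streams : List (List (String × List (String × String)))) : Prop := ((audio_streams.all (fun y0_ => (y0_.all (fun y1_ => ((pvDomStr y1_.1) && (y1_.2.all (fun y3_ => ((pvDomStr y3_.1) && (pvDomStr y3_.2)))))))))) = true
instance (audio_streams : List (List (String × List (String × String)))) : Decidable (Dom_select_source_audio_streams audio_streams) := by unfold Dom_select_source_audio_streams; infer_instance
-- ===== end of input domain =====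

-- B replaces A's stateful single pass (languages list + none_language flag + streams list) by a
-- stateless comprehension keeping each stream iff its language key is absent from the keys of the
-- streams before it; objective: alternative (same values, different algorithmic decomposition).

-- ===== PORT A =====
-- A's loop body over state (languages, none_language, streams).
def pvStepA (st : List String × Bool × List (List (String × List (String × String))))
    (s : List (String × List (String × String))) :
    List String × Bool × List (List (String × List (String × String))) :=
  let tags := (PySem.Dict.mk s).getD "tags" []          -- s.get('tags', {})
  let language := (PySem.Dict.mk tags).get? "language"  -- tags.get('language', None)
  match language with
  | none =>
      if st.2.1 then st else (st.1, true, st.2.2 ++ [s])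
  | some lng =>                                          -- str(language) on a str is the identity
      if lng ∈ st.1 then st else (st.1 ++ [lng], st.2.1, st.2.2 ++ [s])

def select_source_audio_streams (audio_streams : List (List (String × List (String × String)))) : List (List (String × List (String × String))) :=
  (audio_streams.foldl pvStepA ([], false, [])).2.2

-- ===== PORT B =====
-- Source B's key helper: `language if language is None else str(language)`; str on a str is the
-- identity, so key(s) is exactly the optional lookup.
def pvKeyB (s : List (String × List (String × String))) : Option String :=
  (PySem.Dict.mk ((PySem.Dict.mk s).getD "tags" [])).get? "language"

-- [s for i, s in enumerate(audio_streams) if key(s) not in [key(t) for t in audio_streams[:i]]]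
def select_source_audio_streams_alt (audio_streams : List (List (String × List (String × String)))) : List (List (String × List (String × String))) :=
  (PySem.List.enumerate audio_streams 0).filterMap (fun is =>
    if pvKeyB is.2 ∈ (PySem.List.slice audio_streams none (some is.1)).map pvKeyB then none
    else some is.2)

-- ===== PRECONDITION & SPEC =====
def Spec_select_source_audio_streams (audio_streams : List (List (String × List (String × String)))) (out : List (List (String × List (String × String)))) : Prop := out = select_source_audio_streams_alt audio_streams
instance (audio_streams : List (List (String × List (String × String)))) (out : List (List (String × List (String × String)))) : Decidable (Spec_select_source_audio_streams audio_streams out) := by unfold Spec_select_source_audio_streams; infer_instance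

-- ===== CLAIM (what is proved, stated in full; the proofs are below) =====
def Claim_equal_select_source_audio_streams : Prop := ∀ (audio_streams : List (List (String × List (String × String)))), Dom_select_source_audio_streams audio_streams → Spec_select_source_audio_streams audio_streams (select_source_audio_streams audio_streams)

-- ===== LEMMAS AND PROOFS =====

-- Common reference: first-occurrence filter of l relative to an already-seen prefix p.
def pvSelRec (p l : List (List (String × List (String × String)))) :
    List (List (String × List (String × String))) :=
  match l with
  | [] => []
  | s :: rest =>
      if pvKeyB s ∈ p.map pvKeyB then pvSelRec (p ++ [s]) rest
      else s :: pvSelRec (p ++ [s]) rest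

-- B equals the reference filter: induction on the suffix, generalizing the prefix.
theorem pv_b_eq_selRec (l p : List (List (String × List (String × String)))) :
    (PySem.List.enumerate l (p.length : Int)).filterMap (fun is =>
      if pvKeyB is.2 ∈ (PySem.List.slice (p ++ l) none (some is.1)).map pvKeyB then none
      else some is.2) = pvSelRec p l := by
  induction l generalizing p with
  | nil => simp [PySem.List.enumerate_nil, pvSelRec]
  | cons s rest ih =>
      rw [PySem.List.enumerate_cons, List.filterMap_cons]
      have hsl : PySem.List.slice (p ++ s :: rest) none (some (p.length : Int)) = p := by
        rw [PySem.List.slice_to_natCast]; simp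
      have hrest :
          (PySem.List.enumerate rest ((p.length : Int) + 1)).filterMap (fun is =>
            if pvKeyB is.2 ∈ (PySem.List.slice (p ++ s :: rest) none (some is.1)).map pvKeyB then none
            else some is.2) = pvSelRec (p ++ [s]) rest := by
        have h1 : ((p.length : Int) + 1) = (((p ++ [s]).length : Nat) : Int) := by
          simp
        have h2 : p ++ s :: rest = (p ++ [s]) ++ rest := by simp
        rw [h1, h2]
        exact ih (p ++ [s])
      simp only [hsl]
      by_cases hm : pvKeyB s ∈ p.map pvKeyB
      · rw [if_pos hm]
        simp only [pvSelRec]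
        rw [if_pos hm]
        exact hrest
      · rw [if_neg hm]
        simp only [pvSelRec]
        rw [if_neg hm]
        exact congrArg (s :: ·) hrest

-- Membership in a map over a one-element extension, kept in ∨-form (no ∃ unfolding).
theorem pv_mem_map_concat {α β : Type} (f : α → β) (p : List α) (s : α) (y : β) :
    y ∈ (p ++ [s]).map f ↔ y ∈ p.map f ∨ y = f s := by
  simp only [List.map_append, List.map_cons, List.map_nil, List.mem_append, List.mem_cons,
    List.not_mem_nil, or_false]

-- A equals the reference filter: the loop invariant relates A's state to the processed prefix p —
-- langs holds exactly the some-keys of p, nl says whether a none key occurred, streams is the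
-- selection so far.
theorem pv_a_eq_selRec (l p : List (List (String × List (String × String))))
    (langs : List String) (nl : Bool)
    (streams : List (List (String × List (String × String))))
    (hl : ∀ x : String, x ∈ langs ↔ some x ∈ p.map pvKeyB)
    (hn : nl = true ↔ none ∈ p.map pvKeyB) :
    (l.foldl pvStepA (langs, nl, streams)).2.2 = streams ++ pvSelRec p l := by
  induction l generalizing p langs nl streams with
  | nil => simp [pvSelRec]
  | cons s rest ih =>
      simp only [List.foldl_cons]
      have hkeydef : pvKeyB s = (PySem.Dict.mk ((PySem.Dict.mk s).getD "tags" [])).get? "language" := rfl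
      cases hkey : pvKeyB s with
      | none =>
          by_cases hnl : nl = true
          · have hstep : pvStepA (langs, nl, streams) s = (langs, nl, streams) := by
              simp [pvStepA, ← hkeydef, hkey, hnl]
            rw [hstep]
            have hmem : pvKeyB s ∈ p.map pvKeyB := by rw [hkey]; exact hn.mp hnl
            simp only [pvSelRec]
            rw [if_pos hmem]
            refine ih (p ++ [s]) langs nl streams ?_ ?_
            · intro x
              rw [pv_mem_map_concat, hkey, hl x]
              constructor
              · exact Or.inl
              · rintro (h | h)
                · exact h
                · exact absurd h (by simp)
            · rw [pv_mem_map_concat, hkey]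
              constructor
              · intro _; exact Or.inr rfl
              · intro _; exact hnl
          · have hstep : pvStepA (langs, nl, streams) s = (langs, true, streams ++ [s]) := by
              simp [pvStepA, ← hkeydef, hkey, hnl]
            have hnotin : pvKeyB s ∉ p.map pvKeyB := by
              rw [hkey]; intro h; exact hnl (hn.mpr h)
            rw [hstep]
            simp only [pvSelRec]
            rw [if_neg hnotin]
            rw [ih (p ++ [s]) langs true (streams ++ [s]) ?_ ?_]
            · simp
            · intro x
              rw [pv_mem_map_concat, hkey, hl x]
              constructor
              · exact Or.inl
              · rintro (h | h)
                · exact h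
                · exact absurd h (by simp)
            · rw [pv_mem_map_concat, hkey]
              simp
      | some lng =>
          by_cases hm : lng ∈ langs
          · have hstep : pvStepA (langs, nl, streams) s = (langs, nl, streams) := by
              simp [pvStepA, ← hkeydef, hkey, hm]
            rw [hstep]
            have hmem : pvKeyB s ∈ p.map pvKeyB := by rw [hkey]; exact (hl lng).mp hm
            simp only [pvSelRec]
            rw [if_pos hmem]
            refine ih (p ++ [s]) langs nl streams ?_ ?_
            · intro x
              rw [pv_mem_map_concat, hkey, hl x]
              constructor
              · exact Or.inl
              · rintro (h | h)
                · exact h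
                · injection h with h'
                  rw [h']; exact (hl lng).mp hm
            · rw [pv_mem_map_concat, hkey, hn]
              constructor
              · exact Or.inl
              · rintro (h | h)
                · exact h
                · exact absurd h (by simp)
          · have hstep : pvStepA (langs, nl, streams) s = (langs ++ [lng], nl, streams ++ [s]) := by
              simp [pvStepA, ← hkeydef, hkey, hm]
            have hnotin : pvKeyB s ∉ p.map pvKeyB := by
              rw [hkey]; intro h; exact hm ((hl lng).mpr h)
            rw [hstep]
            simp only [pvSelRec]
            rw [if_neg hnotin]
            rw [ih (p ++ [s]) (langs ++ [lng]) nl (streams ++ [s]) ?_ ?_]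
            · simp
            · intro x
              rw [pv_mem_map_concat, hkey]
              constructor
              · intro h
                rcases List.mem_append.mp h with h' | h'
                · exact Or.inl ((hl x).mp h')
                · have hx : x = lng := by simpa using h'
                  exact Or.inr (by rw [hx])
              · rintro (h | h)
                · exact List.mem_append.mpr (Or.inl ((hl x).mpr h))
                · injection h with h'
                  exact List.mem_append.mpr (Or.inr (by simp [h']))
            · rw [pv_mem_map_concat, hkey, hn]
              constructor
              · exact Or.inl
              · rintro (h | h)
                · exact h
                · exact absurd h (by simp)

-- ===== VERDICT (by name: the statement is the Claim_ definition above) =====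
theorem select_source_audio_streams_spec : Claim_equal_select_source_audio_streams := by
  intro audio_streams _
  show select_source_audio_streams audio_streams = select_source_audio_streams_alt audio_streams
  have hb : select_source_audio_streams_alt audio_streams = pvSelRec [] audio_streams := by
    have h := pv_b_eq_selRec audio_streams []
    simp only [List.nil_append, List.length_nil, Nat.cast_zero] at h
    exact h
  have ha : select_source_audio_streams audio_streams = pvSelRec [] audio_streams := by
    show (audio_streams.foldl pvStepA ([], false, [])).2.2 = _
    have h := pv_a_eq_selRec audio_streams [] [] false [] (by simp) (by simp)
    simpa using h
  rw [ha, hb]
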